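-- pv_equiv track=rewrite | github.com/taucompling/mdl-reg-approach | corpora.py | _make_dyck_n_strings_from_range
-- ===== SOURCE A (Python) =====
-- from typing import List, Optional, Union
--
-- _DYCK_BRACKET_PAIRS = (
--     ("[", "]"),
--     ("(", ")"),
--     ("{", "}"),
--     ("<", ">"),
--     ("⟦", "⟧"),
--     ("〔", " 〕"),
-- )
--
-- def _make_dyck_n_strings_for_length(
--     target_length: int, n: int, batch_size: int
-- ) -> List[str]:
--     if target_length == 0:
--         return [""]  # Include the empty string as a valid Dyck string
--     if target_length % 2 != 0:
--         return []  # Dyck strings must have even length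
--
--     bracket_pairs = _DYCK_BRACKET_PAIRS[:n]
--     results = []
--     stack = []
--
--     def backtrack(current: List[str], open_count: int, close_count: int) -> None:
--         if len(results) >= batch_size:
--             # Stop further processing if batch_size is reached
--             return
--
--         if len(current) == target_length:
--             if open_count == close_count:
--                 results.append("".join(current))
--             return
--
--         # If we can add an opening bracket, try all types
--         if open_count < target_length // 2:
--             for idx, (open_br, _) in enumerate(bracket_pairs):
--                 current.append(open_br)
--                 stack.append(idx)  # Keep track of which bracket type was opened
--                 backtrack(current, open_count + 1, close_count)
--                 stack.pop()
--                 current.pop()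
--
--         # If we can add a closing bracket, close the most recent open bracket
--         if close_count < open_count and stack:
--             last_bracket_idx = stack[-1]
--             _, close_br = bracket_pairs[last_bracket_idx]
--             current.append(close_br)
--             stack.pop()
--             backtrack(current, open_count, close_count + 1)
--             stack.append(last_bracket_idx)
--             current.pop()
--
--     backtrack([], 0, 0)
--     return results
--
-- def _make_dyck_n_strings_from_range(
--     min_length: int, max_length: int, n: int, batch_size: int
-- ) -> List[str]:
--     results = []
--     for length in range(min_length, max_length + 1, 2):
--         dyck_strings = _make_dyck_n_strings_for_length(
--             length, n, batch_size - len(results)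
--         )
--         results.extend(dyck_strings)
--     return results
-- ===== SOURCE B (Python) =====
-- from typing import List
--
-- _DYCK_BRACKET_PAIRS = (
--     ("[", "]"),
--     ("(", ")"),
--     ("{", "}"),
--     ("<", ">"),
--     ("⟦", "⟧"),
--     ("〔", " 〕"),
-- )
--
-- def _make_dyck_n_strings_from_range(
--     min_length: int, max_length: int, n: int, batch_size: int
-- ) -> List[str]:
--     pairs = _DYCK_BRACKET_PAIRS[:n]
--     results = []
--     for length in range(min_length, max_length + 1, 2):
--         if length == 0:
--             results.append("")  # the empty string is a valid Dyck string
--             continue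
--         if length % 2 != 0:
--             continue
--         remaining = batch_size - len(results)
--         count = 0
--         # iterative DFS over states (string, open_count, close_count, open_type_stack),
--         # popping in the same preorder the recursive enumerator would visit
--         work = [("", 0, 0, ())]
--         while work and count < remaining:
--             s, op, cl, st = work.pop()
--             if op + cl == length:
--                 results.append(s)
--                 count += 1
--                 continue
--             children = []
--             if op < length // 2:
--                 for idx, (open_br, _) in enumerate(pairs):
--                     children.append((s + open_br, op + 1, cl, st + (idx,)))
--             if cl < op and st:
--                 children.append((s + pairs[st[-1]][1], op, cl + 1, st[:-1]))
--             work.extend(reversed(children))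
--     return results
-- ===== Notes on version B (the rewrite author's own statement) =====
-- stated objective: alternative
-- what changed: A's recursive backtracking closure with shared mutable current/stack/results is replaced by an explicit iterative DFS: a work-stack of immutable (string, open, close, type-stack) states popped in the same preorder, counting emitted strings against the remaining batch budget instead of re-checking len(results) at every recursive entry.
import Mathlib
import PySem

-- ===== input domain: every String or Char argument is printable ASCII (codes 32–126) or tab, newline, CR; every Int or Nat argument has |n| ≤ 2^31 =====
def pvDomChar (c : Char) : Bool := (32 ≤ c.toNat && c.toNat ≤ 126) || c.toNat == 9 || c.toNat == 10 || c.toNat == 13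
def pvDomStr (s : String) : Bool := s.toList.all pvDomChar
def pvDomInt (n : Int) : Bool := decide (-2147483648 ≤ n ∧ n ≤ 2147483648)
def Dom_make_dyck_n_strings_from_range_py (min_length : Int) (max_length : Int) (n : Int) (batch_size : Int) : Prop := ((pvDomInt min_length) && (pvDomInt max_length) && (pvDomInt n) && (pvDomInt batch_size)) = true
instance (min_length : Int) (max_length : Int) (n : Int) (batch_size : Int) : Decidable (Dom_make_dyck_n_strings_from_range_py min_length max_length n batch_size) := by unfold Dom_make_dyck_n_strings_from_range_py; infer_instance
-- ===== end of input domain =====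

-- B replaces A's recursive backtracking enumerator by an explicit work-stack DFS that visits
-- the same states in the same preorder (objective: alternative decomposition, same cost).

-- ===== PORT A =====
-- module constant _DYCK_BRACKET_PAIRS
def pvDyckPairs : List (String × String) :=
  [("[", "]"), ("(", ")"), ("{", "}"), ("<", ">"), ("⟦", "⟧"), ("〔", " 〕")]

-- A's recursive `backtrack`; `results` is threaded as the accumulator, `stack` as a parameter
-- (the Python restores `stack`/`current` after each recursive call, so the child call simply
-- receives the extended/shrunk value).  The Nat argument is a fuel bound on the recursion
-- depth (the Python recursion depth is at most target_length+1) — a totality guard only.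
-- `stack[-1]`/`pairs[last]` are ported with PySem.List.pyGet?; the `.getD` defaults are never
-- used because the Python indexings are guarded by `stack ≠ []` resp. index provenance.
def pvBacktrackA (target bs : Int) (pairs : List (String × String)) :
    Nat → List String → Int → Int → List Int → List String → List String
  | 0, _, _, _, _, results => results
  | fuel+1, current, openC, closeC, stack, results =>
    if bs ≤ (results.length : Int) then results
    else if (current.length : Int) = target then
      if openC = closeC then results ++ [PySem.Str.join "" current] else results
    else
      let results1 :=
        if openC < PySem.Int.floordiv target 2 then
          (PySem.List.enumerate pairs).foldl
            (fun res ip =>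
              pvBacktrackA target bs pairs fuel (current ++ [ip.2.1]) (openC + 1) closeC
                (stack ++ [ip.1]) res)
            results
        else results
      if closeC < openC ∧ stack ≠ [] then
        pvBacktrackA target bs pairs fuel
          (current ++ [((PySem.List.pyGet? pairs ((PySem.List.pyGet? stack (-1)).getD 0)).getD ("", "")).2])
          openC (closeC + 1) stack.dropLast results1
      else results1

-- _make_dyck_n_strings_for_length
def pvDyckForLengthA (target n bs : Int) : List String :=
  if target = 0 then [""]
  else if PySem.Int.mod target 2 ≠ 0 then []
  else
    pvBacktrackA target bs (PySem.List.slice pvDyckPairs none (some n))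
      (target.toNat + 1) [] 0 0 [] []

def make_dyck_n_strings_from_range_py (min_length : Int) (max_length : Int) (n : Int) (batch_size : Int) : List String :=
  (PySem.List.pyRange min_length (max_length + 1) 2).foldl
    (fun results length =>
      results ++ pvDyckForLengthA length n (batch_size - (results.length : Int)))
    []

-- ===== PORT B =====
-- children of a DFS state (string built so far, open count, close count, open-type stack),
-- in the order B's Python builds them; `st[-1]`, `pairs[idx]`, `st[:-1]` via PySem
-- (the `.getD` defaults are unreachable: the close child is guarded by `st ≠ []`).
def pvDyckChildren (length : Int) (pairs : List (String × String))
    (s : String) (opC clC : Int) (st : List Int) : List (String × Int × Int × List Int) :=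
  (if opC < PySem.Int.floordiv length 2 then
      (PySem.List.enumerate pairs).map (fun ip => (s ++ ip.2.1, opC + 1, clC, st ++ [ip.1]))
    else [])
  ++ (if clC < opC ∧ st ≠ [] then
        [(s ++ ((PySem.List.pyGet? pairs ((PySem.List.pyGet? st (-1)).getD 0)).getD ("", "")).2,
          opC, clC + 1, PySem.List.slice st none (some (-1)))]
      else [])

-- the `while work and count < remaining` loop: pop the top state, either record a finished
-- string or push its children so that they are popped in DFS preorder
def pvDyckLoopB (length remaining : Int) (pairs : List (String × String)) :
    Nat → List (String × Int × Int × List Int) → Int → List String → List String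
  | 0, _, _, acc => acc
  | fuel+1, work, count, acc =>
    match work with
    | [] => acc
    | (s, opC, clC, st) :: rest =>
      if remaining ≤ count then acc
      else if opC + clC = length then
        pvDyckLoopB length remaining pairs fuel rest (count + 1) (acc ++ [s])
      else
        pvDyckLoopB length remaining pairs fuel
          (pvDyckChildren length pairs s opC clC st ++ rest) count acc

def make_dyck_n_strings_from_range_py_alt (min_length : Int) (max_length : Int) (n : Int) (batch_size : Int) : List String :=
  let pairs := PySem.List.slice pvDyckPairs none (some n)
  (PySem.List.pyRange min_length (max_length + 1) 2).foldl
    (fun results length =>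
      if length = 0 then results ++ [""]
      else if PySem.Int.mod length 2 ≠ 0 then results
      else
        pvDyckLoopB length (batch_size - (results.length : Int)) pairs
          ((pairs.length + 2) ^ (length.toNat + 1))
          [("", 0, 0, [])] 0 results)
    []

-- ===== PRECONDITION & SPEC =====
-- (no Pre_: both ports are total and agree on every input)
def Spec_make_dyck_n_strings_from_range_py (min_length : Int) (max_length : Int) (n : Int) (batch_size : Int) (out : List String) : Prop := out = make_dyck_n_strings_from_range_py_alt min_length max_length n batch_size
instance (min_length : Int) (max_length : Int) (n : Int) (batch_size : Int) (out : List String) : Decidable (Spec_make_dyck_n_strings_from_range_py min_length max_length n batch_size out) := by unfold Spec_make_dyck_n_strings_from_range_py; infer_instance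

-- ===== CLAIM (what is proved, stated in full; the proofs are below) =====
def Claim_equal_make_dyck_n_strings_from_range_py : Prop := ∀ (min_length : Int) (max_length : Int) (n : Int) (batch_size : Int), Dom_make_dyck_n_strings_from_range_py min_length max_length n batch_size → Spec_make_dyck_n_strings_from_range_py min_length max_length n batch_size (make_dyck_n_strings_from_range_py min_length max_length n batch_size)

-- ===== LEMMAS AND PROOFS =====

-- the leaves (completed strings) below an A-state, in A's DFS preorder; the Nat is depth fuel
def pvLeavesA (t : Int) (pairs : List (String × String)) :
    Nat → List String → Int → Int → List Int → List String
  | 0, _, _, _, _ => []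
  | f+1, cur, opC, clC, st =>
    if (cur.length : Int) = t then (if opC = clC then [PySem.Str.join "" cur] else [])
    else
      (if opC < PySem.Int.floordiv t 2 then
          (PySem.List.enumerate pairs).flatMap
            (fun ip => pvLeavesA t pairs f (cur ++ [ip.2.1]) (opC + 1) clC (st ++ [ip.1]))
        else [])
      ++ (if clC < opC ∧ st ≠ [] then
            pvLeavesA t pairs f
              (cur ++ [((PySem.List.pyGet? pairs ((PySem.List.pyGet? st (-1)).getD 0)).getD ("", "")).2])
              opC (clC + 1) st.dropLast
          else [])

-- the leaves below a B-state, via B's child construction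
def pvLeavesB (t : Int) (pairs : List (String × String)) :
    Nat → String → Int → Int → List Int → List String
  | 0, _, _, _, _ => []
  | f+1, s, opC, clC, st =>
    if opC + clC = t then [s]
    else (pvDyckChildren t pairs s opC clC st).flatMap
           (fun c => pvLeavesB t pairs f c.1 c.2.1 c.2.2.1 c.2.2.2)

-- proof-side exact DFS-tree node count (used only to justify the loop fuel below)
def pvDyckNodeCount (length : Int) (numPairs : Nat) : Nat → Int → Int → Nat
  | 0, _, _ => 1
  | f+1, opC, clC =>
    if opC + clC = length then 1
    else
      1 + (if opC < PySem.Int.floordiv length 2 then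
              numPairs * pvDyckNodeCount length numPairs f (opC + 1) clC else 0)
        + (if clC < opC then pvDyckNodeCount length numPairs f opC (clC + 1) else 0)

-- exact depth fuel for a state at move count opC+clC
def pvNeeded (t opC clC : Int) : Nat := (t - (opC + clC)).toNat + 1

def pvSZ (t : Int) (np : Nat) (opC clC : Int) : Nat :=
  pvDyckNodeCount t np (pvNeeded t opC clC) opC clC

def pvLB (t : Int) (pairs : List (String × String)) (w : String × Int × Int × List Int) : List String :=
  pvLeavesB t pairs (pvNeeded t w.2.1 w.2.2.1) w.1 w.2.1 w.2.2.1 w.2.2.2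

-- invariant of every reachable DFS state
def pvInv (t opC clC : Int) (st : List Int) : Prop :=
  0 ≤ clC ∧ clC ≤ opC ∧ opC ≤ PySem.Int.floordiv t 2 ∧ (st.length : Int) = opC - clC

lemma pvChunk (bs : Int) (res X Y : List String) :
    (res ++ X.take (bs - (res.length : Int)).toNat) ++
        Y.take ((bs - (((res ++ X.take (bs - (res.length : Int)).toNat).length : Nat) : Int)).toNat)
      = res ++ (X ++ Y).take (bs - (res.length : Int)).toNat := by
  have harith : (bs - (((res ++ X.take (bs - (res.length : Int)).toNat).length : Nat) : Int)).toNat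
      = (bs - (res.length : Int)).toNat - X.length := by
    simp [List.length_append, List.length_take]
    omega
  rw [harith, List.append_assoc, ← List.take_append]

lemma pvFoldlTake {a : Type} (bs : Int) (g : a → List String)
    (F : List String → a → List String) :
    ∀ (l : List a),
      (∀ r x, x ∈ l → F r x = r ++ (g x).take ((bs - (r.length : Int)).toNat)) →
      ∀ res, l.foldl F res = res ++ (l.flatMap g).take ((bs - (res.length : Int)).toNat)
  | [], _, res => by simp
  | x :: l, h, res => by
    rw [List.foldl_cons, h res x (by simp),
      pvFoldlTake bs g F l (fun r y hy => h r y (by simp [hy])) _, List.flatMap_cons]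
    exact pvChunk bs res (g x) (l.flatMap g)

-- A's backtracking returns the first batch of its leaf list
lemma pvBacktrackA_char (t bs : Int) (pairs : List (String × String)) :
    ∀ (f : Nat) (cur : List String) (opC clC : Int) (st : List Int) (res : List String),
      pvBacktrackA t bs pairs f cur opC clC st res
        = res ++ (pvLeavesA t pairs f cur opC clC st).take ((bs - (res.length : Int)).toNat) := by
  intro f
  induction f with
  | zero => intro cur opC clC st res; simp [pvBacktrackA, pvLeavesA]
  | succ f ih =>
    intro cur opC clC st res
    by_cases hfull : bs ≤ (res.length : Int)
    · have h0 : (bs - (res.length : Int)).toNat = 0 := by omega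
      simp only [pvBacktrackA, if_pos hfull, h0, List.take_zero, List.append_nil]
    · by_cases hleaf : (cur.length : Int) = t
      · simp only [pvBacktrackA, pvLeavesA, if_neg hfull, if_pos hleaf]
        by_cases hoc : opC = clC
        · rw [if_pos hoc, if_pos hoc,
            List.take_of_length_le (by simp; omega)]
        · simp [if_neg hoc]
      · simp only [pvBacktrackA, pvLeavesA, if_neg hfull, if_neg hleaf]
        have hopen :
            (if opC < PySem.Int.floordiv t 2 then
                (PySem.List.enumerate pairs).foldl
                  (fun r ip => pvBacktrackA t bs pairs f (cur ++ [ip.2.1]) (opC + 1) clC (st ++ [ip.1]) r) res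
              else res)
            = res ++ (if opC < PySem.Int.floordiv t 2 then
                (PySem.List.enumerate pairs).flatMap
                  (fun ip => pvLeavesA t pairs f (cur ++ [ip.2.1]) (opC + 1) clC (st ++ [ip.1]))
              else []).take ((bs - (res.length : Int)).toNat) := by
          split_ifs with h
          · exact pvFoldlTake bs _ _ (PySem.List.enumerate pairs)
              (fun r ip _ => ih (cur ++ [ip.2.1]) (opC + 1) clC (st ++ [ip.1]) r) res
          · simp
        have hclose : ∀ r : List String,
            (if clC < opC ∧ st ≠ [] then
                pvBacktrackA t bs pairs f
                  (cur ++ [((PySem.List.pyGet? pairs ((PySem.List.pyGet? st (-1)).getD 0)).getD ("", "")).2])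
                  opC (clC + 1) st.dropLast r
              else r)
            = r ++ (if clC < opC ∧ st ≠ [] then
                pvLeavesA t pairs f
                  (cur ++ [((PySem.List.pyGet? pairs ((PySem.List.pyGet? st (-1)).getD 0)).getD ("", "")).2])
                  opC (clC + 1) st.dropLast
              else []).take ((bs - (r.length : Int)).toNat) := by
          intro r
          split_ifs with h
          · exact ih _ opC (clC + 1) st.dropLast r
          · simp
        rw [hclose _, hopen]
        exact pvChunk bs res _ _

lemma pvJoinFlatten (l : List (List Char)) : PySem.Chars.join [] l = l.flatten := by
  induction l with
  | nil => simp [PySem.Chars.join_nil]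
  | cons x l ih =>
    cases l with
    | nil => simp [PySem.Chars.join_singleton]
    | cons y r => rw [PySem.Chars.join_cons_cons, List.flatten_cons, ← ih]; simp

lemma pvJoinSnoc (cur : List String) (x : String) :
    PySem.Str.join "" (cur ++ [x]) = PySem.Str.join "" cur ++ x := by
  simp [PySem.Str.join, pvJoinFlatten, String.ofList_append, String.ofList_toList]

-- B's leaves below a state equal A's leaves below the corresponding state
lemma pvBridge (t : Int) (pairs : List (String × String)) (ht : 2 ∣ t) :
    ∀ (f : Nat) (cur : List String) (opC clC : Int) (st : List Int),
      pvInv t opC clC st → (cur.length : Int) = opC + clC →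
      pvLeavesB t pairs f (PySem.Str.join "" cur) opC clC st = pvLeavesA t pairs f cur opC clC st := by
  intro f
  induction f with
  | zero => intro cur opC clC st _ _; simp [pvLeavesA, pvLeavesB]
  | succ f ih =>
    intro cur opC clC st hinv hlen
    obtain ⟨h1, h2, h3, h4⟩ := hinv
    have htt : 2 * PySem.Int.floordiv t 2 = t := by
      rw [PySem.Int.floordiv_eq_ediv_of_pos (by omega : (0:Int) < 2)]; omega
    simp only [pvLeavesA, pvLeavesB, hlen]
    by_cases hleaf : opC + clC = t
    · rw [if_pos hleaf, if_pos hleaf, if_pos (by omega : opC = clC)]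
    · rw [if_neg hleaf, if_neg hleaf]
      unfold pvDyckChildren
      rw [List.flatMap_append]
      congr 1
      · by_cases hop : opC < PySem.Int.floordiv t 2
        · rw [if_pos hop, if_pos hop, List.flatMap_map]
          congr 1
          funext ip
          show pvLeavesB t pairs f (PySem.Str.join "" cur ++ ip.2.1) (opC + 1) clC (st ++ [ip.1]) = _
          rw [← pvJoinSnoc]
          exact ih (cur ++ [ip.2.1]) (opC + 1) clC (st ++ [ip.1])
            ⟨by omega, by omega, by omega, by simp; omega⟩ (by simp; omega)
        · rw [if_neg hop, if_neg hop]; simp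
      · by_cases hcl : clC < opC ∧ st ≠ []
        · rw [if_pos hcl, if_pos hcl]
          have hstlen : 1 ≤ st.length := by
            rcases Nat.eq_zero_or_pos st.length with h | h
            · exact absurd (List.length_eq_zero_iff.1 h) hcl.2
            · exact h
          simp only [List.flatMap_cons, List.flatMap_nil, List.append_nil]
          show pvLeavesB t pairs f _ opC (clC + 1) (PySem.List.slice st none (some (-1))) = _
          rw [PySem.List.slice_to_neg_one, ← pvJoinSnoc]
          exact ih _ opC (clC + 1) st.dropLast
            ⟨by omega, by omega, by omega, by simp [List.length_dropLast]; omega⟩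
            (by simp; omega)
        · rw [if_neg hcl, if_neg hcl]; simp

lemma pvNodeCount_pos (t : Int) (np : Nat) (f : Nat) (opC clC : Int) :
    1 ≤ pvDyckNodeCount t np f opC clC := by
  cases f with
  | zero => simp [pvDyckNodeCount]
  | succ f => simp only [pvDyckNodeCount]; split_ifs <;> omega

lemma pvNodeCount_le_pow (t : Int) (np : Nat) :
    ∀ (f : Nat) (opC clC : Int), pvDyckNodeCount t np f opC clC ≤ (np + 2) ^ f := by
  intro f
  induction f with
  | zero => intro opC clC; simp [pvDyckNodeCount]
  | succ f ih =>
    intro opC clC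
    have hp : 1 ≤ (np + 2) ^ f := Nat.one_le_pow _ _ (by omega)
    have h1 : (if opC < PySem.Int.floordiv t 2 then
        np * pvDyckNodeCount t np f (opC + 1) clC else 0) ≤ np * (np + 2) ^ f := by
      split_ifs
      · exact Nat.mul_le_mul_left np (ih (opC + 1) clC)
      · exact Nat.zero_le _
    have h2 : (if clC < opC then pvDyckNodeCount t np f opC (clC + 1) else 0) ≤ (np + 2) ^ f := by
      split_ifs
      · exact ih opC (clC + 1)
      · exact Nat.zero_le _
    have hfin : 1 + np * (np + 2) ^ f + (np + 2) ^ f ≤ (np + 2) ^ (f + 1) := by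
      rw [pow_succ]; nlinarith
    simp only [pvDyckNodeCount]
    by_cases hleaf : opC + clC = t
    · rw [if_pos hleaf]
      exact Nat.one_le_pow _ _ (by omega)
    · rw [if_neg hleaf]
      omega

lemma pvSZ_leaf (t : Int) (np : Nat) (opC clC : Int) (h : opC + clC = t) :
    pvSZ t np opC clC = 1 := by
  unfold pvSZ
  rw [show pvNeeded t opC clC = 0 + 1 from by unfold pvNeeded; omega]
  simp [pvDyckNodeCount, h]

lemma pvSZ_nonleaf (t : Int) (np : Nat) (opC clC : Int) (h : opC + clC < t) :
    pvSZ t np opC clC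
      = 1 + (if opC < PySem.Int.floordiv t 2 then np * pvSZ t np (opC + 1) clC else 0)
          + (if clC < opC then pvSZ t np opC (clC + 1) else 0) := by
  unfold pvSZ
  rw [show pvNeeded t opC clC = pvNeeded t (opC + 1) clC + 1 from by unfold pvNeeded; omega,
    show pvNeeded t opC (clC + 1) = pvNeeded t (opC + 1) clC from by unfold pvNeeded; omega]
  simp only [pvDyckNodeCount]
  rw [if_neg (by omega)]

lemma pvSumMapConst {a : Type} (l : List a) (c : Nat) :
    (l.map (fun _ => c)).sum = l.length * c := by
  induction l with
  | nil => simp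
  | cons x l ih => simp [Nat.succ_mul, Nat.add_comm]

lemma pvLB_leaf (t : Int) (pairs : List (String × String)) (s : String) (opC clC : Int)
    (st : List Int) (h : opC + clC = t) : pvLB t pairs (s, opC, clC, st) = [s] := by
  unfold pvLB
  rw [show pvNeeded t opC clC = 0 + 1 from by unfold pvNeeded; omega]
  simp [pvLeavesB, h]

lemma pvLB_nonleaf (t : Int) (pairs : List (String × String)) (s : String) (opC clC : Int)
    (st : List Int) (h : opC + clC < t) :
    pvLB t pairs (s, opC, clC, st)
      = (pvDyckChildren t pairs s opC clC st).flatMap (pvLB t pairs) := by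
  unfold pvLB
  rw [show pvNeeded t opC clC = pvNeeded t (opC + 1) clC + 1 from by unfold pvNeeded; omega]
  simp only [pvLeavesB]
  rw [if_neg (by omega)]
  unfold pvDyckChildren
  rw [List.flatMap_append, List.flatMap_append]
  congr 1
  · split_ifs with hop
    · simp only [List.flatMap_map]
    · rfl
  · split_ifs with hcl
    · rw [show pvNeeded t (opC + 1) clC = pvNeeded t opC (clC + 1) from by unfold pvNeeded; omega]
      rfl
    · rfl

lemma pvChildrenInv (t : Int) (pairs : List (String × String)) (s : String)
    (opC clC : Int) (st : List Int) (hinv : pvInv t opC clC st) :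
    ∀ w ∈ pvDyckChildren t pairs s opC clC st, pvInv t w.2.1 w.2.2.1 w.2.2.2 := by
  obtain ⟨h1, h2, h3, h4⟩ := hinv
  intro w hw
  unfold pvDyckChildren at hw
  rcases List.mem_append.1 hw with hw | hw
  · by_cases hop : opC < PySem.Int.floordiv t 2
    · rw [if_pos hop] at hw
      obtain ⟨ip, _, rfl⟩ := List.mem_map.1 hw
      show pvInv t (opC + 1) clC (st ++ [ip.1])
      exact ⟨by omega, by omega, by omega, by simp; omega⟩
    · rw [if_neg hop] at hw; cases hw
  · by_cases hcl : clC < opC ∧ st ≠ []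
    · rw [if_pos hcl] at hw
      have hstlen : 1 ≤ st.length := by
        rcases Nat.eq_zero_or_pos st.length with h | h
        · exact absurd (List.length_eq_zero_iff.1 h) hcl.2
        · exact h
      simp only [List.mem_singleton] at hw
      subst hw
      show pvInv t opC (clC + 1) (PySem.List.slice st none (some (-1)))
      refine ⟨by omega, by omega, by omega, ?_⟩
      rw [PySem.List.slice_to_neg_one]
      simp [List.length_dropLast]; omega
    · rw [if_neg hcl] at hw; cases hw

lemma pvChildrenSum (t : Int) (pairs : List (String × String)) (s : String)
    (opC clC : Int) (st : List Int) (hinv : pvInv t opC clC st) (hne : opC + clC ≠ t)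
    (ht : 2 ∣ t) :
    pvSZ t pairs.length opC clC
      = 1 + ((pvDyckChildren t pairs s opC clC st).map
              (fun w => pvSZ t pairs.length w.2.1 w.2.2.1)).sum := by
  obtain ⟨h1, h2, h3, h4⟩ := hinv
  have htt : 2 * PySem.Int.floordiv t 2 = t := by
    rw [PySem.Int.floordiv_eq_ediv_of_pos (by omega : (0:Int) < 2)]; omega
  have hlt : opC + clC < t := by omega
  have hstiff : (clC < opC ∧ st ≠ []) ↔ clC < opC := by
    constructor
    · exact fun h => h.1
    · intro h
      refine ⟨h, fun hnil => ?_⟩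
      rw [hnil] at h4; simp at h4; omega
  rw [pvSZ_nonleaf t pairs.length opC clC hlt]
  unfold pvDyckChildren
  rw [List.map_append, List.sum_append]
  have hopen : ((if opC < PySem.Int.floordiv t 2 then
        (PySem.List.enumerate pairs).map (fun ip => (s ++ ip.2.1, opC + 1, clC, st ++ [ip.1]))
      else []).map (fun w => pvSZ t pairs.length w.2.1 w.2.2.1)).sum
      = (if opC < PySem.Int.floordiv t 2 then pairs.length * pvSZ t pairs.length (opC + 1) clC else 0) := by
    split_ifs with hop
    · rw [List.map_map]
      show ((PySem.List.enumerate pairs).map (fun _ => pvSZ t pairs.length (opC + 1) clC)).sum = _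
      rw [pvSumMapConst, PySem.List.length_enumerate]
    · simp
  have hclose : ((if clC < opC ∧ st ≠ [] then
        [(s ++ ((PySem.List.pyGet? pairs ((PySem.List.pyGet? st (-1)).getD 0)).getD ("", "")).2,
          opC, clC + 1, PySem.List.slice st none (some (-1)))] else []).map
        (fun w => pvSZ t pairs.length w.2.1 w.2.2.1)).sum
      = (if clC < opC then pvSZ t pairs.length opC (clC + 1) else 0) := by
    simp only [hstiff]
    split_ifs with hcl
    · show pvSZ t pairs.length opC (clC + 1) + 0 = _
      omega
    · simp
  rw [hopen, hclose]
  omega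

-- B's loop appends the first (remaining - count) leaves of the work list
lemma pvLoopChar (t remaining : Int) (pairs : List (String × String)) (ht : 2 ∣ t) :
    ∀ (f : Nat) (work : List (String × Int × Int × List Int)) (count : Int) (acc : List String),
      (∀ w ∈ work, pvInv t w.2.1 w.2.2.1 w.2.2.2) →
      ((work.map (fun w => pvSZ t pairs.length w.2.1 w.2.2.1)).sum ≤ f) →
      pvDyckLoopB t remaining pairs f work count acc
        = acc ++ (work.flatMap (pvLB t pairs)).take ((remaining - count).toNat) := by
  have htt : 2 * PySem.Int.floordiv t 2 = t := by
    rw [PySem.Int.floordiv_eq_ediv_of_pos (by omega : (0:Int) < 2)]; omega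
  intro f
  induction f with
  | zero =>
    intro work count acc _ hsz
    cases work with
    | nil => simp [pvDyckLoopB]
    | cons w rest =>
      exfalso
      have := pvNodeCount_pos t pairs.length (pvNeeded t w.2.1 w.2.2.1) w.2.1 w.2.2.1
      simp only [List.map_cons, List.sum_cons] at hsz
      unfold pvSZ at hsz
      omega
  | succ f ih =>
    intro work count acc hinv hsz
    cases work with
    | nil => simp [pvDyckLoopB]
    | cons w rest =>
      obtain ⟨s, opC, clC, st⟩ := w
      by_cases hfull : remaining ≤ count
      · rw [show (remaining - count).toNat = 0 from by omega]
        simp [pvDyckLoopB, if_pos hfull]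
      · have hwinv : pvInv t opC clC st := hinv _ (List.mem_cons_self ..)
        simp only [List.map_cons, List.sum_cons] at hsz
        by_cases hleaf : opC + clC = t
        · simp only [pvDyckLoopB, if_neg hfull, if_pos hleaf]
          rw [ih rest (count + 1) (acc ++ [s])
            (fun w hw => hinv w (List.mem_cons_of_mem _ hw))
            (by rw [pvSZ_leaf t pairs.length opC clC hleaf] at hsz; omega)]
          rw [List.flatMap_cons, pvLB_leaf t pairs s opC clC st hleaf, List.take_append]
          rw [List.take_of_length_le (l := [s]) (by simp; omega)]
          rw [show (remaining - count).toNat - [s].length = (remaining - (count + 1)).toNat from by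
            simp; omega]
          simp
        · obtain ⟨h1, h2, h3, h4⟩ := hwinv
          have hlt : opC + clC < t := by omega
          simp only [pvDyckLoopB, if_neg hfull, if_neg hleaf]
          rw [ih (pvDyckChildren t pairs s opC clC st ++ rest) count acc
            (by
              intro w hw
              rcases List.mem_append.1 hw with hw | hw
              · exact pvChildrenInv t pairs s opC clC st ⟨h1, h2, h3, h4⟩ w hw
              · exact hinv w (List.mem_cons_of_mem _ hw))
            (by
              rw [List.map_append, List.sum_append]
              have := pvChildrenSum t pairs s opC clC st ⟨h1, h2, h3, h4⟩ hleaf ht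
              omega)]
          rw [List.flatMap_append, List.flatMap_cons,
            pvLB_nonleaf t pairs s opC clC st hlt]

-- the two per-length computations agree, for every accumulated-results prefix
lemma pvPerLength (n bs t : Int) (results : List String) :
    results ++ pvDyckForLengthA t n (bs - (results.length : Int)) =
      (if t = 0 then results ++ [""]
       else if PySem.Int.mod t 2 ≠ 0 then results
       else
         pvDyckLoopB t (bs - (results.length : Int)) (PySem.List.slice pvDyckPairs none (some n))
           (((PySem.List.slice pvDyckPairs none (some n)).length + 2) ^ (t.toNat + 1))
           [("", 0, 0, [])] 0 results) := by
  by_cases h0 : t = 0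
  · simp [pvDyckForLengthA, h0]
  by_cases hodd : PySem.Int.mod t 2 ≠ 0
  · unfold pvDyckForLengthA
    rw [if_neg h0, if_neg h0, if_pos hodd, if_pos hodd, List.append_nil]
  rw [if_neg h0, if_neg hodd]
  unfold pvDyckForLengthA
  rw [if_neg h0, if_neg hodd]
  have ht2 : (2:Int) ∣ t := (PySem.Int.mod_eq_zero_iff_dvd t 2).1 (not_not.1 hodd)
  set pairs := PySem.List.slice pvDyckPairs none (some n) with hp
  set bs' := bs - (results.length : Int) with hbs'
  rcases lt_trichotomy t 0 with hneg | h0' | hpos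
  · -- negative even length: both sides are `results`
    have hfd : ¬ ((0:Int) < PySem.Int.floordiv t 2) := by
      rw [PySem.Int.floordiv_eq_ediv_of_pos (by omega : (0:Int) < 2)]; omega
    have hne0 : ¬ ((0:Int) = t) := by omega
    rw [show t.toNat + 1 = 0 + 1 from by omega]
    have hAside : pvBacktrackA t bs' pairs (0 + 1) [] 0 0 [] [] = ([] : List String) := by
      simp [pvBacktrackA, hne0]
    have hBside : pvDyckLoopB t bs' pairs ((pairs.length + 2) ^ (0 + 1)) [("", 0, 0, [])] 0 results
        = results := by
      have hfd2 : ¬ ((0:Int) < t / 2) := by omega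
      simp [pvDyckLoopB, pvDyckChildren, hne0, hfd2]
    rw [hAside, hBside, List.append_nil]
  · exact absurd h0' h0
  · -- positive even length: both sides are the first bs' leaves of the DFS tree
    have hfd0 : 0 ≤ PySem.Int.floordiv t 2 := by
      rw [PySem.Int.floordiv_eq_ediv_of_pos (by omega : (0:Int) < 2)]
      exact Int.ediv_nonneg (by omega) (by omega)
    have hA := pvBacktrackA_char t bs' pairs (t.toNat + 1) [] 0 0 [] []
    simp only [List.length_nil, Nat.cast_zero, sub_zero, List.nil_append] at hA
    rw [hA]
    rw [pvLoopChar t bs' pairs ht2 ((pairs.length + 2) ^ (t.toNat + 1)) [("", 0, 0, [])] 0 results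
      (by
        intro w hw
        simp only [List.mem_singleton] at hw
        subst hw
        exact ⟨le_refl 0, le_refl 0, hfd0, by simp⟩)
      (by
        simp only [List.map_cons, List.map_nil, List.sum_cons, List.sum_nil, Nat.add_zero]
        unfold pvSZ
        rw [show pvNeeded t 0 0 = t.toNat + 1 from by unfold pvNeeded; omega]
        exact pvNodeCount_le_pow t pairs.length (t.toNat + 1) 0 0)]
    congr 1
    rw [List.flatMap_cons, List.flatMap_nil, List.append_nil]
    unfold pvLB
    rw [show pvNeeded t 0 0 = t.toNat + 1 from by unfold pvNeeded; omega]
    rw [show ("" : String) = PySem.Str.join "" [] from rfl]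
    rw [pvBridge t pairs ht2 (t.toNat + 1) [] 0 0 [] ⟨le_refl 0, le_refl 0, hfd0, by simp⟩ (by simp)]
    rw [sub_zero]

-- ===== VERDICT (by name: the statement is the Claim_ definition above) =====
theorem make_dyck_n_strings_from_range_py_spec : Claim_equal_make_dyck_n_strings_from_range_py := by
  intro min_length max_length n batch_size _
  unfold Spec_make_dyck_n_strings_from_range_py
  unfold make_dyck_n_strings_from_range_py make_dyck_n_strings_from_range_py_alt
  exact List.foldl_ext _ _ [] (fun results t _ => pvPerLength n batch_size t results)
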